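-- pv_equiv track=rewrite | github.com/Cleveerty/WynnAppTest | DocuScope/core/builder.py | prioritize_by_stats
-- ===== SOURCE A (Python) =====
-- from typing import List, Dict, Any, Optional, Tuple
--
-- def prioritize_by_stats(items: List[Dict[str, Any]], preferred_stats: List[str], boost: bool = False) -> List[Dict[str, Any]]:
--     """Prioritize items that have preferred stats."""
--     scored_items = []
--
--     for item in items:
--         score = 0
--         for stat in preferred_stats:
--             if stat in item and item[stat] != 0:
--                 score += 1
--
--         scored_items.append((item, score))
--
--     # Sort by score, keep all items but prioritize high-scoring ones
--     scored_items.sort(key=lambda x: x[1], reverse=True)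
--
--     # If boost is True, only keep items with at least one preferred stat
--     if boost:
--         scored_items = [(item, score) for item, score in scored_items if score > 0]
--
--     return [item for item, score in scored_items]
-- ===== SOURCE B (Python) =====
-- from typing import List, Dict, Any
--
-- def prioritize_by_stats(items: List[Dict[str, Any]], preferred_stats: List[str], boost: bool = False) -> List[Dict[str, Any]]:
--     """Prioritize items that have preferred stats (bucket/counting sort over the bounded score)."""
--     k = len(preferred_stats)
--     buckets = [[] for _ in range(k + 1)]
--     for item in items:
--         score = 0
--         for stat in preferred_stats:
--             if stat in item and item[stat] != 0:
--                 score += 1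
--         buckets[score].append(item)
--     result = []
--     for s in range(k, -1, -1):
--         if boost and s == 0:
--             continue
--         result.extend(buckets[s])
--     return result
-- ===== Notes on version B (the rewrite author's own statement) =====
-- stated objective: alternative
-- what changed: Replaced the comparison sort over scores by a counting/bucket sort: items are appended to buckets[score] in one pass and buckets are concatenated from highest score down, skipping bucket 0 when boost is set (which also replaces the separate post-sort filter pass).
import Mathlib
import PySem

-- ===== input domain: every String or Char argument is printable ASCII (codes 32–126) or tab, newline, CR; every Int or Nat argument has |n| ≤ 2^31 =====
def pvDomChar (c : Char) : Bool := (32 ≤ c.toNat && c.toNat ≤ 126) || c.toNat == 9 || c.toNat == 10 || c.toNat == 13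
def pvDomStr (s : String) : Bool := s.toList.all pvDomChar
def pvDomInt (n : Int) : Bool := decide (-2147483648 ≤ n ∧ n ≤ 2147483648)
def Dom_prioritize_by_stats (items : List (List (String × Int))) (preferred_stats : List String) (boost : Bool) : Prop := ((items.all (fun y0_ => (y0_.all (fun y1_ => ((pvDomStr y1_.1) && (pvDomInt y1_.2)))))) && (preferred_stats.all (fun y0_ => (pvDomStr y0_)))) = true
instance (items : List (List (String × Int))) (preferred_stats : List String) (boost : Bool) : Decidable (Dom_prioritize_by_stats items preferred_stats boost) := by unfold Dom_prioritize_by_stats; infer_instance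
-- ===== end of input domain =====

-- B replaces A's stable reverse comparison sort over the score by a counting/bucket sort over the
-- bounded score, folding the boost filter into the bucket concatenation: objective = alternative.

-- ===== PORT A =====
-- A's inner loop body: `if stat in item and item[stat] != 0: score += 1`
-- (B's Python contains the identical scoring loop, so both ports share these two helpers)
def pvStep (item : List (String × Int)) (score : Int) (stat : String) : Int :=
  match (PySem.Dict.mk item).get? stat with
  | some v => if v ≠ 0 then score + 1 else score
  | none => score

-- `score = 0; for stat in preferred_stats: …`
def pvScore (preferred_stats : List String) (item : List (String × Int)) : Int :=
  preferred_stats.foldl (pvStep item) 0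

def prioritize_by_stats (items : List (List (String × Int))) (preferred_stats : List String) (boost : Bool) : List (List (String × Int)) :=
  let scored_items := items.map (fun item => (item, pvScore preferred_stats item))
  let scored_items := PySem.List.sorted scored_items (fun x => x.2) true
  let scored_items := if boost then scored_items.filter (fun x => decide (x.2 > 0)) else scored_items
  scored_items.map (fun x => x.1)

-- ===== PORT B =====
def prioritize_by_stats_alt (items : List (List (String × Int))) (preferred_stats : List String) (boost : Bool) : List (List (String × Int)) :=
  let k := preferred_stats.length
  let buckets := items.foldl
    (fun bs item => bs.modify (pvScore preferred_stats item).toNat (fun b => b ++ [item]))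
    (List.replicate (k + 1) [])
  ((List.range (k + 1)).reverse).foldl
    (fun result s => if boost && s == 0 then result else result ++ buckets.getD s []) []

-- ===== PRECONDITION & SPEC =====
def Spec_prioritize_by_stats (items : List (List (String × Int))) (preferred_stats : List String) (boost : Bool) (out : List (List (String × Int))) : Prop := out = prioritize_by_stats_alt items preferred_stats boost
instance (items : List (List (String × Int))) (preferred_stats : List String) (boost : Bool) (out : List (List (String × Int))) : Decidable (Spec_prioritize_by_stats items preferred_stats boost out) := by unfold Spec_prioritize_by_stats; infer_instance

-- ===== CLAIM (what is proved, stated in full; the proofs are below) =====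
def Claim_equal_prioritize_by_stats : Prop := ∀ (items : List (List (String × Int))) (preferred_stats : List String) (boost : Bool), Dom_prioritize_by_stats items preferred_stats boost → Spec_prioritize_by_stats items preferred_stats boost (prioritize_by_stats items preferred_stats boost)

-- ===== LEMMAS AND PROOFS =====

-- Each pass of A's scoring loop adds 0 or 1.
theorem pvStep_cases (item : List (String × Int)) (score : Int) (stat : String) :
    pvStep item score stat = score ∨ pvStep item score stat = score + 1 := by
  unfold pvStep
  rcases (PySem.Dict.mk item).get? stat with _ | v
  · exact Or.inl rfl
  · by_cases hv : v ≠ 0 <;> simp [hv]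

theorem pvScore_aux (ps : List String) (item : List (String × Int)) (init : Int) :
    init ≤ ps.foldl (pvStep item) init ∧ ps.foldl (pvStep item) init ≤ init + ps.length := by
  induction ps generalizing init with
  | nil => simp
  | cons s t ih =>
    simp only [List.foldl_cons, List.length_cons]
    rcases pvStep_cases item init s with h | h <;> rw [h] <;>
      exact ⟨le_trans (by omega) (ih _).1, le_trans (ih _).2 (by push_cast; omega)⟩

-- The score is bounded: 0 ≤ score ≤ len(preferred_stats).
theorem pvScore_nonneg_le (preferred_stats : List String) (item : List (String × Int)) :
    0 ≤ pvScore preferred_stats item ∧ pvScore preferred_stats item ≤ preferred_stats.length := by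
  have := pvScore_aux preferred_stats item 0
  unfold pvScore
  omega

-- insertBy passes over a prefix none of whose elements x goes before.
theorem insertBy_skip {α : Type} (before : α → α → Bool) (x : α) (l m : List α)
    (h : ∀ y ∈ l, before x y = false) :
    PySem.List.insertBy before x (l ++ m) = l ++ PySem.List.insertBy before x m := by
  induction l with
  | nil => simp
  | cons a t ih =>
    simp only [List.cons_append, PySem.List.insertBy, h a (by simp)]
    simp [ih (fun y hy => h y (by simp [hy]))]

-- insertBy puts x in front if it goes before everything.
theorem insertBy_front {α : Type} (before : α → α → Bool) (x : α) (ys : List α)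
    (h : ∀ y ∈ ys, before x y = true) :
    PySem.List.insertBy before x ys = x :: ys := by
  cases ys with
  | nil => rfl
  | cons a t => simp [PySem.List.insertBy, h a (by simp)]

theorem key_le_of_mem_buckets {α : Type} (key : α → Int) (xs : List α) (k : Nat) (y : α)
    (hy : y ∈ ((List.range (k + 1)).reverse).flatMap (fun (s : Nat) => xs.filter (fun a => decide (key a = (s : Int))))) :
    key y ≤ (k : Int) := by
  rcases List.mem_flatMap.1 hy with ⟨s, hs, hmem⟩
  have h1 := (List.mem_filter.1 hmem).2
  have h2 := List.mem_range.1 (List.mem_reverse.1 hs)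
  have := of_decide_eq_true h1
  omega

-- One stable insertion into the descending bucket concatenation lands at the end of bucket (key x).
theorem insertBy_buckets {α : Type} (key : α → Int) (x : α) (xs : List α) (k : Nat)
    (h0 : 0 ≤ key x) (hk : key x ≤ (k : Int)) :
    PySem.List.insertBy (fun a b => decide (key b < key a)) x
      (((List.range (k + 1)).reverse).flatMap (fun (s : Nat) => xs.filter (fun a => decide (key a = (s : Int))))) =
    ((List.range (k + 1)).reverse).flatMap (fun (s : Nat) => (xs ++ [x]).filter (fun a => decide (key a = (s : Int)))) := by
  induction k with
  | zero =>
    have hx0 : key x = 0 := by omega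
    rw [PySem.List.insertBy_of_forall_not_before _ _ _ (by
      intro y hy
      rcases List.mem_flatMap.1 hy with ⟨s, hs, hmem⟩
      have := of_decide_eq_true ((List.mem_filter.1 hmem).2)
      simp [this, hx0])]
    simp [List.filter_append, hx0]
  | succ k ih =>
    have hsplit : (List.range (k + 1 + 1)).reverse = (k + 1) :: (List.range (k + 1)).reverse := by
      simp [List.range_succ]
    rw [hsplit]
    simp only [List.flatMap_cons]
    by_cases hx : key x = ((k + 1 : Nat) : Int)
    · -- x belongs to the topmost bucket: it goes after that whole bucket, before everything lower
      rw [insertBy_skip _ _ _ _ (by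
        intro y hy
        have := of_decide_eq_true ((List.mem_filter.1 hy).2)
        simp [this, hx])]
      rw [insertBy_front _ _ _ (by
        intro y hy
        have := key_le_of_mem_buckets key xs (k) y hy
        simp only [decide_eq_true_eq]
        omega)]
      have htop : (xs ++ [x]).filter (fun a => decide (key a = ((k + 1 : Nat) : Int))) =
          xs.filter (fun a => decide (key a = ((k + 1 : Nat) : Int))) ++ [x] := by
        simp [List.filter_append, hx]
      rw [htop]
      have hrest : ((List.range (k + 1)).reverse).flatMap (fun (s : Nat) => (xs ++ [x]).filter (fun a => decide (key a = (s : Int)))) =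
          ((List.range (k + 1)).reverse).flatMap (fun (s : Nat) => xs.filter (fun a => decide (key a = (s : Int)))) := by
        apply List.flatMap_congr
        intro s hs
        have h2 := List.mem_range.1 (List.mem_reverse.1 hs)
        have hne : ¬ (key x = (s : Int)) := by omega
        simp [List.filter_append, hne]
      rw [hrest]
      simp
    · -- x belongs to a lower bucket: skip the topmost bucket and recurse
      have hxk : key x ≤ (k : Int) := by
        have : key x < ((k+1 : Nat) : Int) := lt_of_le_of_ne hk hx
        push_cast at this ⊢
        omega
      rw [insertBy_skip _ _ _ _ (by
        intro y hy
        have := of_decide_eq_true ((List.mem_filter.1 hy).2)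
        simp only [decide_eq_false_iff_not, not_lt, this]
        push_cast
        omega)]
      rw [ih hxk]
      have htop : (xs ++ [x]).filter (fun a => decide (key a = ((k + 1 : Nat) : Int))) =
          xs.filter (fun a => decide (key a = ((k + 1 : Nat) : Int))) := by
        simp only [List.filter_append, List.filter_cons, List.filter_nil]
        have : ¬ (key x = ((k + 1 : Nat) : Int)) := hx
        push_cast at this
        simp [this]
      rw [htop]

-- Python's stable reverse sort by a score in [0, k] IS the descending bucket concatenation.
theorem sortedRev_eq_buckets {α : Type} (key : α → Int) (xs : List α) (k : Nat)
    (h : ∀ x ∈ xs, 0 ≤ key x ∧ key x ≤ (k : Int)) :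
    PySem.List.sorted xs key true =
    ((List.range (k + 1)).reverse).flatMap (fun (s : Nat) => xs.filter (fun a => decide (key a = (s : Int)))) := by
  rw [PySem.List.sorted_rev_eq_foldl_insertBy]
  induction xs using List.reverseRecOn with
  | nil => simp
  | append_singleton ys x ih =>
    rw [List.foldl_append]
    simp only [List.foldl_cons, List.foldl_nil]
    rw [ih (fun y hy => h y (by simp [hy]))]
    exact insertBy_buckets key x ys k (h x (by simp)).1 (h x (by simp)).2

-- B's bucket-filling pass produces exactly the per-score filters.
theorem buckets_fold {α : Type} (key : α → Int) (items : List α) (k : Nat)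
    (h : ∀ x ∈ items, 0 ≤ key x ∧ key x ≤ (k : Int)) :
    items.foldl (fun bs x => bs.modify (key x).toNat (fun b => b ++ [x])) (List.replicate (k + 1) ([] : List α)) =
    (List.range (k + 1)).map (fun (s : Nat) => items.filter (fun a => decide (key a = (s : Int)))) := by
  induction items using List.reverseRecOn with
  | nil =>
    apply List.ext_getElem (by simp)
    intro i h1 h2
    simp
  | append_singleton ys x ih =>
    rw [List.foldl_append]
    simp only [List.foldl_cons, List.foldl_nil]
    rw [ih (fun y hy => h y (by simp [hy]))]
    have hx := h x (by simp)
    apply List.ext_getElem (by simp [List.length_modify])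
    intro i h1 h2
    rw [List.getElem_modify]
    have hi : i < k + 1 := by simpa using h2
    have hkey : (key x).toNat = i ↔ key x = (i : Int) := by omega
    by_cases hc : (key x).toNat = i
    · simp only [hc]
      simp only [List.getElem_map, List.getElem_range]
      rw [List.filter_append]
      simp [hkey.1 hc]
    · rw [if_neg hc]
      simp only [List.getElem_map, List.getElem_range]
      rw [List.filter_append]
      have : ¬ key x = (i : Int) := fun hh => hc (hkey.2 hh)
      simp [this]

-- B's output loop with the `boost` skip, as a flatMap.
theorem foldl_skip_eq_flatMap {α β : Type} (p : α → Bool) (g : α → List β) (l : List α) :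
    l.foldl (fun acc x => if p x then acc else acc ++ g x) [] =
    l.flatMap (fun x => if p x then [] else g x) := by
  suffices h : ∀ acc : List β, l.foldl (fun acc x => if p x then acc else acc ++ g x) acc =
      acc ++ l.flatMap (fun x => if p x then [] else g x) by
    simpa using h []
  induction l with
  | nil => simp
  | cons x t ih =>
    intro acc
    by_cases hx : p x <;> simp [hx, ih]

theorem main_eq (items : List (List (String × Int))) (prefs : List String) (boost : Bool) :
    prioritize_by_stats items prefs boost = prioritize_by_stats_alt items prefs boost := by
  simp only [prioritize_by_stats, prioritize_by_stats_alt]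
  have hb : ∀ x ∈ items.map (fun item => (item, pvScore prefs item)),
      0 ≤ (fun p => p.2) x ∧ (fun p => p.2) x ≤ (prefs.length : Int) := by
    intro x hx
    rcases List.mem_map.1 hx with ⟨it, _, rfl⟩
    exact pvScore_nonneg_le prefs it
  rw [sortedRev_eq_buckets (fun (x : (List (String × Int)) × Int) => x.2) (items.map (fun item => (item, pvScore prefs item))) prefs.length hb]
  rw [buckets_fold (pvScore prefs) items prefs.length (fun x _ => pvScore_nonneg_le prefs x)]
  cases boost with
  | false =>
    simp only [Bool.false_and, if_neg (by decide : ¬ (false = true))]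
    rw [PySem.List.foldl_append_eq_flatMap, List.nil_append, List.map_flatMap]
    apply List.flatMap_congr
    intro s hs
    have hsk : s < prefs.length + 1 := List.mem_range.1 (List.mem_reverse.1 hs)
    rw [List.getD_eq_getElem _ _ (by simpa using hsk)]
    simp [List.filter_map, Function.comp_def, List.map_map]
  | true =>
    simp only [Bool.true_and, if_true, List.filter_flatMap, List.map_flatMap]
    rw [foldl_skip_eq_flatMap (fun s => s == 0)
      (fun s => (((List.range (prefs.length + 1)).map (fun (s : Nat) => items.filter (fun a => decide (pvScore prefs a = (s : Int))))).getD s []))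
      ((List.range (prefs.length + 1)).reverse)]
    apply List.flatMap_congr
    intro s hs
    have hsk : s < prefs.length + 1 := List.mem_range.1 (List.mem_reverse.1 hs)
    by_cases hs0 : s = 0
    · subst hs0
      simp only [beq_self_eq_true, if_true]
      rw [List.map_eq_nil_iff, List.filter_eq_nil_iff]
      intro a ha
      have := of_decide_eq_true ((List.mem_filter.1 ha).2)
      simp [this]
    · have hbeq : (s == 0) = false := by simp [hs0]
      rw [hbeq, if_neg (by decide : ¬ (false = true))]
      rw [List.getD_eq_getElem _ _ (by simpa using hsk)]
      have hkeep : (List.filter (fun x => decide (x.2 > 0))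
          ((items.map (fun item => (item, pvScore prefs item))).filter (fun a => decide (a.2 = (s : Int))))) =
          ((items.map (fun item => (item, pvScore prefs item))).filter (fun a => decide (a.2 = (s : Int)))) := by
        apply List.filter_eq_self.2
        intro a ha
        have := of_decide_eq_true ((List.mem_filter.1 ha).2)
        simp only [decide_eq_true_eq, this]
        omega
      rw [hkeep]
      simp [List.filter_map, Function.comp_def, List.map_map]

-- ===== VERDICT (by name: the statement is the Claim_ definition above) =====
theorem prioritize_by_stats_spec : Claim_equal_prioritize_by_stats := by
  intro items preferred_stats boost _
  exact main_eq items preferred_stats boost
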